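-- pv_equiv track=rewrite | github.com/WhiteMatrixTech/NFT-Tool-backup | blender/2.93/scripts/addons/better_fbx/exporter.py | fix_rig_user_bone
-- ===== SOURCE A (Python) =====
-- def fix_rig_user_bone(hierarchy_dic, child_bone_name, father_bone_name):
--     child_bone_key = None
--     father_bone_key = None
--     for (key, value) in hierarchy_dic.items():
--         if value[0] == 'BONE':
--             bone_name = value[1].lower()
--             if bone_name == child_bone_name:
--                 child_bone_key = key
--             if bone_name == father_bone_name:
--                 father_bone_key = key
--     # bone not found
--     if child_bone_key == None or father_bone_key == None:
--         return False
--     # set parent for child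
--     hierarchy_dic[child_bone_key][2] = father_bone_key
--     return True
-- ===== SOURCE B (Python) =====
-- def fix_rig_user_bone(hierarchy_dic, child_bone_name, father_bone_name):
--     items = list(hierarchy_dic.items())
--
--     def find_last(name):
--         # search back-to-front; the first hit is the last match in original order
--         for key, value in reversed(items):
--             if value[0] == 'BONE' and value[1].lower() == name:
--                 return key
--         return None
--
--     child_bone_key = find_last(child_bone_name)
--     if child_bone_key is None:
--         return False
--     father_bone_key = find_last(father_bone_name)
--     if father_bone_key is None:
--         return False
--     hierarchy_dic[child_bone_key][2] = father_bone_key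
--     return True
-- ===== Notes on version B (the rewrite author's own statement) =====
-- stated objective: alternative
-- what changed: Replaces A's single forward scan that threads two running key variables by two staged back-to-front searches with early exit (first hit in reverse order = last match), returning False between the stages; equivalence is about the return value only (both mutate the child entry identically).
-- outside the precondition, e.g. on fix_rig_user_bone({'k': ['BONE', 'a']}, 'a', 'b'): A returns False, B returns False
import Mathlib
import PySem

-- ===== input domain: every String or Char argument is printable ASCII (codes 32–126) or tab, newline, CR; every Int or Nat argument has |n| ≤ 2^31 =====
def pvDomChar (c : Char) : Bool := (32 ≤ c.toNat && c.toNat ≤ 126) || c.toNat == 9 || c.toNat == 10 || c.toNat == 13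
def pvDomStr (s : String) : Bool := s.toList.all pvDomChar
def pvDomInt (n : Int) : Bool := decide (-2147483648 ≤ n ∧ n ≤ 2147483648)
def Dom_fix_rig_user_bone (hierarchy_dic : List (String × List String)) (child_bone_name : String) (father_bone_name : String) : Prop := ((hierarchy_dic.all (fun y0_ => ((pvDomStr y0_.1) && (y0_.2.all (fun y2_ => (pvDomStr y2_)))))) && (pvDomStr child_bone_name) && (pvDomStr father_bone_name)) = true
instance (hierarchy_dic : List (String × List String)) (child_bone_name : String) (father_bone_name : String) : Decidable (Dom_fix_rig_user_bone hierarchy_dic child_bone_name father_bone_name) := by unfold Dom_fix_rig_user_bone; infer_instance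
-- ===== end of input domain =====

-- B replaces A's forward scan threading two running key variables by two staged back-to-front
-- searches with early exit (first hit in reverse order = last match); equivalence is about the
-- RETURN value only — both Pythons also mutate hierarchy_dic[child_bone_key][2] identically,
-- which is not modelled here.

-- ===== PORT A =====
-- one step of A's for-loop body over the running pair (child_bone_key, father_bone_key)
def pvAStep (child_bone_name father_bone_name : String)
    (acc : Option String × Option String) (kv : String × List String) :
    Option String × Option String :=
  match PySem.List.pyGet? kv.2 0 with
  | some v0 =>
    if v0 = "BONE" then
      match PySem.List.pyGet? kv.2 1 with
      | some v1 =>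
        let bone_name := PySem.Str.lower v1
        ((if bone_name = child_bone_name then some kv.1 else acc.1),
         (if bone_name = father_bone_name then some kv.1 else acc.2))
      | none => acc  -- Python raises IndexError here; excluded by Pre_
    else acc
  | none => acc      -- Python raises IndexError here; excluded by Pre_

def fix_rig_user_bone (hierarchy_dic : List (String × List String)) (child_bone_name : String) (father_bone_name : String) : Bool :=
  let st := hierarchy_dic.foldl (pvAStep child_bone_name father_bone_name) (none, none)
  match st with
  | (some _, some _) => true  -- sets hierarchy_dic[child_bone_key][2]; mutation not modelled
  | _ => false

-- ===== PORT B =====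
-- does one item match the searched lowered bone name? (with Python's `and` short-circuit shape)
def pvMatch1 (name : String) (kv : String × List String) : Option String :=
  match PySem.List.pyGet? kv.2 0 with
  | some v0 =>
    if v0 = "BONE" then
      match PySem.List.pyGet? kv.2 1 with
      | some v1 => if PySem.Str.lower v1 = name then some kv.1 else none
      | none => none  -- Python raises IndexError here; excluded by Pre_
    else none
  | none => none      -- Python raises IndexError here; excluded by Pre_

-- B's find_last: walk the reversed item list, early-return the first hit
def pvFindRev (name : String) : List (String × List String) → Option String
  | [] => none
  | kv :: rest =>
    match pvMatch1 name kv with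
    | some k => some k
    | none => pvFindRev name rest

def fix_rig_user_bone_alt (hierarchy_dic : List (String × List String)) (child_bone_name : String) (father_bone_name : String) : Bool :=
  let items := hierarchy_dic
  match pvFindRev child_bone_name items.reverse with
  | none => false
  | some _ =>
    match pvFindRev father_bone_name items.reverse with
    | none => false
    | some _ => true  -- sets hierarchy_dic[child_bone_key][2]; mutation not modelled

-- ===== PRECONDITION & SPEC =====
-- Pre_ excludes (a) duplicate keys, on which the association-list model diverges from a Python
-- dict, and (b) inputs on which A can raise IndexError: an empty value list (value[0]), a
-- 'BONE' entry of length 1 (value[1]), or a 'BONE' entry whose lowered name equals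
-- child_bone_name and is shorter than 3 (the value[2] assignment); the last case is slightly
-- wider than the exact raise set (such an entry raises only when it is the final child match
-- and the father is also found), see the cite in claim.json.
def Pre_fix_rig_user_bone (hierarchy_dic : List (String × List String)) (child_bone_name : String) (_father_bone_name : String) : Prop :=
  (hierarchy_dic.map Prod.fst).Nodup ∧
  ∀ kv ∈ hierarchy_dic, kv.2 ≠ [] ∧
    (kv.2.head? = some "BONE" → 2 ≤ kv.2.length ∧
      (PySem.Str.lower (kv.2.getD 1 "") = child_bone_name → 3 ≤ kv.2.length))
instance (hierarchy_dic : List (String × List String)) (child_bone_name : String) (father_bone_name : String) : Decidable (Pre_fix_rig_user_bone hierarchy_dic child_bone_name father_bone_name) := by unfold Pre_fix_rig_user_bone; infer_instance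

def pvWitness_fix_rig_user_bone : (List (String × List String)) × String × String :=
  ([("Armature|Hip", ["BONE", "Hip", ""]), ("Armature|Leg", ["BONE", "Leg", ""])], "leg", "hip")

def Spec_fix_rig_user_bone (hierarchy_dic : List (String × List String)) (child_bone_name : String) (father_bone_name : String) (out : Bool) : Prop := out = fix_rig_user_bone_alt hierarchy_dic child_bone_name father_bone_name
instance (hierarchy_dic : List (String × List String)) (child_bone_name : String) (father_bone_name : String) (out : Bool) : Decidable (Spec_fix_rig_user_bone hierarchy_dic child_bone_name father_bone_name out) := by unfold Spec_fix_rig_user_bone; infer_instance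

-- ===== CLAIM (what is proved, stated in full; the proofs are below) =====
def Claim_equal_fix_rig_user_bone : Prop := ∀ (hierarchy_dic : List (String × List String)) (child_bone_name : String) (father_bone_name : String), Dom_fix_rig_user_bone hierarchy_dic child_bone_name father_bone_name → Pre_fix_rig_user_bone hierarchy_dic child_bone_name father_bone_name → Spec_fix_rig_user_bone hierarchy_dic child_bone_name father_bone_name (fix_rig_user_bone hierarchy_dic child_bone_name father_bone_name)

-- ===== LEMMAS AND PROOFS =====

-- one A-step, componentwise: the first component is overwritten iff the item matches the child name
theorem pvAStep_fst (c f : String) (acc : Option String × Option String)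
    (kv : String × List String) :
    (pvAStep c f acc kv).1 = (pvMatch1 c kv).or acc.1 := by
  unfold pvAStep pvMatch1
  cases PySem.List.pyGet? kv.2 0 with
  | none => rfl
  | some v0 =>
    by_cases h0 : v0 = "BONE"
    · simp only [h0, if_true]
      cases PySem.List.pyGet? kv.2 1 with
      | none => rfl
      | some v1 => by_cases hc : PySem.Str.lower v1 = c <;> simp [hc]
    · simp [h0]

theorem pvAStep_snd (c f : String) (acc : Option String × Option String)
    (kv : String × List String) :
    (pvAStep c f acc kv).2 = (pvMatch1 f kv).or acc.2 := by
  unfold pvAStep pvMatch1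
  cases PySem.List.pyGet? kv.2 0 with
  | none => rfl
  | some v0 =>
    by_cases h0 : v0 = "BONE"
    · simp only [h0, if_true]
      cases PySem.List.pyGet? kv.2 1 with
      | none => rfl
      | some v1 => by_cases hf : PySem.Str.lower v1 = f <;> simp [hf]
    · simp [h0]

theorem pvFindRev_cons (n : String) (kv : String × List String)
    (l : List (String × List String)) :
    pvFindRev n (kv :: l) = (pvMatch1 n kv).or (pvFindRev n l) := by
  show (match pvMatch1 n kv with
        | some k => some k
        | none => pvFindRev n l) = _
  cases pvMatch1 n kv <;> rfl

theorem pvFindRev_append (n : String) (l1 l2 : List (String × List String)) :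
    pvFindRev n (l1 ++ l2) = (pvFindRev n l1).or (pvFindRev n l2) := by
  induction l1 with
  | nil => simp [pvFindRev]
  | cons kv rest ih =>
    simp only [List.cons_append, pvFindRev_cons, ih, Option.or_assoc]

-- invariant: A's running pair = the back-to-front first hits, falling back to the initial pair
theorem pvFold_eq (c f : String) (l : List (String × List String))
    (a b : Option String) :
    l.foldl (pvAStep c f) (a, b)
      = ((pvFindRev c l.reverse).or a, (pvFindRev f l.reverse).or b) := by
  induction l generalizing a b with
  | nil => simp [pvFindRev]
  | cons kv rest ih =>
    simp only [List.foldl_cons, List.reverse_cons, pvFindRev_append]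
    have h1 := pvAStep_fst c f (a, b) kv
    have h2 := pvAStep_snd c f (a, b) kv
    simp only at h1 h2
    rw [ih, h1, h2]
    rcases hc : pvMatch1 c kv with _ | k1 <;> rcases hf : pvMatch1 f kv with _ | k2 <;>
      simp [pvFindRev, hc, hf]

-- ===== VERDICT (by name: the statement is the Claim_ definition above) =====
theorem fix_rig_user_bone_spec : Claim_equal_fix_rig_user_bone := by
  intro h c f _ _
  unfold Spec_fix_rig_user_bone fix_rig_user_bone fix_rig_user_bone_alt
  have hEq := pvFold_eq c f h none none
  simp only [Option.or_none] at hEq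
  simp only [hEq]
  cases pvFindRev c h.reverse <;> cases pvFindRev f h.reverse <;> rfl
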